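-- pv_equiv track=rewrite | github.com/joonbary/OK_PPT_engine | mckinsey-ppt-generator/app/services/content_analyzer.py | optimize_content_for_layout
-- ===== SOURCE A (Python) =====
-- from typing import Dict, List, Optional, Any
--
-- def optimize_content_for_layout(content: List[str], layout_type: str) -> List[str]:
--     """
--     Enhanced content optimization for all layout types
--     """
--     if layout_type == "bullet_list":
--         # Limit to 5 bullets and truncate long items
--         optimized = []
--         for item in content[:5]:
--             if len(item) > 80:
--                 item = item[:77] + "..."
--             optimized.append(item)
--         return optimized
--
--     elif layout_type == "two_column":
--         # Balance content between columns
--         optimized = []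
--         for item in content[:8]:  # Max 4 per column
--             if len(item) > 60:
--                 item = item[:57] + "..."
--             optimized.append(item)
--         return optimized
--
--     elif layout_type == "three_column":
--         # Distribute across three columns
--         optimized = []
--         for item in content[:9]:  # Max 3 per column
--             if len(item) > 40:
--                 item = item[:37] + "..."
--             optimized.append(item)
--         return optimized
--
--     elif layout_type == "timeline":
--         # Optimize for timeline milestones
--         optimized = []
--         for item in content[:4]:  # Max 4 milestones
--             if len(item) > 30:
--                 item = item[:27] + "..."
--             optimized.append(item)
--         return optimized
--
--     elif layout_type == "process_flow":
--         # Optimize for process steps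
--         optimized = []
--         for item in content[:5]:  # Max 5 steps
--             if len(item) > 40:
--                 item = item[:37] + "..."
--             optimized.append(item)
--         return optimized
--
--     elif layout_type == "pyramid":
--         # Optimize for hierarchy levels
--         optimized = []
--         for item in content[:7]:  # Pyramid structure levels
--             if len(item) > 25:
--                 item = item[:22] + "..."
--             optimized.append(item)
--         return optimized
--
--     elif layout_type == "dashboard_grid":
--         # Optimize for KPI cards
--         optimized = []
--         for item in content[:6]:  # Max 6 KPIs
--             if len(item) > 20:
--                 item = item[:17] + "..."
--             optimized.append(item)
--         return optimized
--
--     elif layout_type == "quote_highlight":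
--         # Optimize for quote content
--         if len(content) > 0 and len(content[0]) > 200:
--             return [content[0][:197] + "..."]
--         return content[:1]  # Single quote
--
--     elif layout_type == "split_screen":
--         # Optimize for balanced panels
--         optimized = []
--         for item in content[:10]:  # Generous limit for panels
--             if len(item) > 300:
--                 item = item[:297] + "..."
--             optimized.append(item)
--         return optimized
--
--     elif layout_type == "agenda_toc":
--         # Optimize for agenda items
--         optimized = []
--         for item in content[:5]:  # Max 5 agenda items
--             if len(item) > 60:
--                 item = item[:57] + "..."
--             optimized.append(item)
--         return optimized
--
--     else:
--         # Default optimization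
--         return content[:7]  # Reasonable default limit
-- ===== SOURCE B (Python) =====
-- _PARAMS = {
--     "bullet_list": (5, 80),
--     "two_column": (8, 60),
--     "three_column": (9, 40),
--     "timeline": (4, 30),
--     "process_flow": (5, 40),
--     "pyramid": (7, 25),
--     "dashboard_grid": (6, 20),
--     "quote_highlight": (1, 200),
--     "split_screen": (10, 300),
--     "agenda_toc": (5, 60),
-- }
--
--
-- def _shrink(items, budget, maxlen):
--     """Recursively keep up to `budget` items, shortening each over-long one."""
--     if budget == 0 or not items:
--         return []
--     head = items[0]
--     if maxlen is not None and len(head) > maxlen: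
--         head = head[:maxlen - 3] + "..."
--     return [head] + _shrink(items[1:], budget - 1, maxlen)
--
--
-- def optimize_content_for_layout(content, layout_type):
--     limit, maxlen = _PARAMS.get(layout_type, (7, None))
--     return _shrink(content, limit, maxlen)
-- ===== Notes on version B (the rewrite author's own statement) =====
-- stated objective: simpler
-- what changed: Replaced the ten-branch if/elif ladder of per-layout slicing loops with a parameter table plus a recursive budget-consuming helper that walks the list head-by-head (no slicing, builds the result by cons), the quote_highlight special case subsumed as (1, 200) and the default as (7, None).
import Mathlib
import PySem

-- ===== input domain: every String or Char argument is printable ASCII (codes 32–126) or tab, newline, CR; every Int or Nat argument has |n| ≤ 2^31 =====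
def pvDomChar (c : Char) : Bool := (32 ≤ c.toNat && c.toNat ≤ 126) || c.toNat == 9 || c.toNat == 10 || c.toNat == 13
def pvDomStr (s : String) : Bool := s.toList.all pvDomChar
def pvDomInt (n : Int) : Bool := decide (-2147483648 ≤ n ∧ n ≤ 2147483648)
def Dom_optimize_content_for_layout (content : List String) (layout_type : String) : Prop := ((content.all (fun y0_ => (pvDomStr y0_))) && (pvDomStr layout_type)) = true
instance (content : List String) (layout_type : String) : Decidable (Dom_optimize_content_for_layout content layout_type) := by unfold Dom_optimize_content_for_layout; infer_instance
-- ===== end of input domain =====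

-- B replaces A's ten-branch if/elif ladder of per-layout slicing loops by a parameter
-- table plus a recursive budget-consuming helper building the result by cons (objective: simpler).

-- ===== PORT A =====
-- Literal port of A: one branch per layout type, each with its own loop over a slice.
def optimize_content_for_layout (content : List String) (layout_type : String) : List String :=
  if layout_type = "bullet_list" then
    (content.take 5).foldl (fun acc item =>
      acc ++ [if 80 < item.toList.length then String.ofList (item.toList.take 77 ++ ['.', '.', '.']) else item]) []
  else if layout_type = "two_column" then
    (content.take 8).foldl (fun acc item =>
      acc ++ [if 60 < item.toList.length then String.ofList (item.toList.take 57 ++ ['.', '.', '.']) else item]) []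
  else if layout_type = "three_column" then
    (content.take 9).foldl (fun acc item =>
      acc ++ [if 40 < item.toList.length then String.ofList (item.toList.take 37 ++ ['.', '.', '.']) else item]) []
  else if layout_type = "timeline" then
    (content.take 4).foldl (fun acc item =>
      acc ++ [if 30 < item.toList.length then String.ofList (item.toList.take 27 ++ ['.', '.', '.']) else item]) []
  else if layout_type = "process_flow" then
    (content.take 5).foldl (fun acc item =>
      acc ++ [if 40 < item.toList.length then String.ofList (item.toList.take 37 ++ ['.', '.', '.']) else item]) []
  else if layout_type = "pyramid" then
    (content.take 7).foldl (fun acc item =>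
      acc ++ [if 25 < item.toList.length then String.ofList (item.toList.take 22 ++ ['.', '.', '.']) else item]) []
  else if layout_type = "dashboard_grid" then
    (content.take 6).foldl (fun acc item =>
      acc ++ [if 20 < item.toList.length then String.ofList (item.toList.take 17 ++ ['.', '.', '.']) else item]) []
  else if layout_type = "quote_highlight" then
    -- 'if len(content) > 0 and len(content[0]) > 200: return [content[0][:197] + "..."]; return content[:1]'
    match content with
    | c0 :: _ =>
      if 200 < c0.toList.length then [String.ofList (c0.toList.take 197 ++ ['.', '.', '.'])]
      else content.take 1
    | [] => content.take 1
  else if layout_type = "split_screen" then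
    (content.take 10).foldl (fun acc item =>
      acc ++ [if 300 < item.toList.length then String.ofList (item.toList.take 297 ++ ['.', '.', '.']) else item]) []
  else if layout_type = "agenda_toc" then
    (content.take 5).foldl (fun acc item =>
      acc ++ [if 60 < item.toList.length then String.ofList (item.toList.take 57 ++ ['.', '.', '.']) else item]) []
  else
    content.take 7

-- ===== PORT B =====
def pvParams : PySem.Dict String (Nat × Option Nat) := PySem.Dict.ofList
  [("bullet_list", (5, some 80)), ("two_column", (8, some 60)), ("three_column", (9, some 40)),
   ("timeline", (4, some 30)), ("process_flow", (5, some 40)), ("pyramid", (7, some 25)),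
   ("dashboard_grid", (6, some 20)), ("quote_highlight", (1, some 200)),
   ("split_screen", (10, some 300)), ("agenda_toc", (5, some 60))]

-- recursive budget-consuming helper (port of Source B's _shrink)
def pvShrink (items : List String) (budget : Nat) (maxlen : Option Nat) : List String :=
  match budget, items with
  | 0, _ => []
  | _, [] => []
  | Nat.succ b, head :: rest =>
    let head' := match maxlen with
      | some m => if m < head.toList.length then String.ofList (head.toList.take (m - 3) ++ ['.', '.', '.']) else head
      | none => head
    [head'] ++ pvShrink rest b maxlen

def optimize_content_for_layout_alt (content : List String) (layout_type : String) : List String :=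
  let p := pvParams.getD layout_type (7, none)
  pvShrink content p.1 p.2

-- ===== PRECONDITION & SPEC =====
def Spec_optimize_content_for_layout (content : List String) (layout_type : String) (out : List String) : Prop := out = optimize_content_for_layout_alt content layout_type
instance (content : List String) (layout_type : String) (out : List String) : Decidable (Spec_optimize_content_for_layout content layout_type out) := by unfold Spec_optimize_content_for_layout; infer_instance

-- ===== CLAIM (what is proved, stated in full; the proofs are below) =====
def Claim_equal_optimize_content_for_layout : Prop := ∀ (content : List String) (layout_type : String), Dom_optimize_content_for_layout content layout_type → Spec_optimize_content_for_layout content layout_type (optimize_content_for_layout content layout_type)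

-- ===== LEMMAS AND PROOFS =====
theorem pvFoldl_append_map {α β : Type} (f : α → β) :
    ∀ (l : List α) (acc : List β), l.foldl (fun a i => a ++ [f i]) acc = acc ++ l.map f
  | [], acc => by simp
  | x :: xs, acc => by
    simp only [List.foldl_cons, List.map_cons]
    rw [pvFoldl_append_map f xs (acc ++ [f x])]
    simp

theorem pvShrink_some (m : Nat) :
    ∀ (l : List String) (k : Nat), pvShrink l k (some m)
      = (l.take k).map (fun item => if m < item.toList.length
          then String.ofList (item.toList.take (m - 3) ++ ['.', '.', '.']) else item)
  | [], k => by cases k <;> rfl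
  | x :: xs, 0 => rfl
  | x :: xs, Nat.succ k => by
    simp only [pvShrink, List.take_succ_cons, List.map_cons]
    rw [pvShrink_some m xs k]
    rfl

theorem pvShrink_none : ∀ (l : List String) (k : Nat), pvShrink l k none = l.take k
  | [], k => by cases k <;> rfl
  | x :: xs, 0 => rfl
  | x :: xs, Nat.succ k => by
    simp only [pvShrink, List.take_succ_cons]
    rw [pvShrink_none xs k]
    rfl

-- A's per-branch loop equals B's recursive helper at (k, some m).
theorem pvBranch_eq (content : List String) (k m t : Nat) (ht : t = m - 3) :
    (content.take k).foldl (fun acc item =>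
        acc ++ [if m < item.toList.length
                then String.ofList (item.toList.take t ++ ['.', '.', '.']) else item]) []
      = pvShrink content k (some m) := by
  subst ht
  rw [pvFoldl_append_map, pvShrink_some]
  rfl

theorem pvParams_default (lt : String)
    (h1 : lt ≠ "bullet_list") (h2 : lt ≠ "two_column") (h3 : lt ≠ "three_column")
    (h4 : lt ≠ "timeline") (h5 : lt ≠ "process_flow") (h6 : lt ≠ "pyramid")
    (h7 : lt ≠ "dashboard_grid") (h8 : lt ≠ "quote_highlight") (h9 : lt ≠ "split_screen")
    (h10 : lt ≠ "agenda_toc") :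
    pvParams.getD lt (7, none) = (7, none) := by
  rw [show pvParams = PySem.Dict.mk
      [("bullet_list", (5, some 80)), ("two_column", (8, some 60)), ("three_column", (9, some 40)),
       ("timeline", (4, some 30)), ("process_flow", (5, some 40)), ("pyramid", (7, some 25)),
       ("dashboard_grid", (6, some 20)), ("quote_highlight", (1, some 200)),
       ("split_screen", (10, some 300)), ("agenda_toc", (5, some 60))] from by decide]
  simp [PySem.Dict.getD, PySem.Dict.get?,
        Ne.symm h1, Ne.symm h2, Ne.symm h3, Ne.symm h4, Ne.symm h5,
        Ne.symm h6, Ne.symm h7, Ne.symm h8, Ne.symm h9, Ne.symm h10]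

-- ===== VERDICT (by name: the statement is the Claim_ definition above) =====
theorem optimize_content_for_layout_spec : Claim_equal_optimize_content_for_layout := by
  intro content lt _
  show _ = _
  by_cases h1 : lt = "bullet_list"
  · subst h1
    simp only [optimize_content_for_layout, if_true]
    rw [pvBranch_eq content 5 80 77 rfl]
    rfl
  by_cases h2 : lt = "two_column"
  · subst h2
    simp only [optimize_content_for_layout, h1, if_false, if_true]
    rw [pvBranch_eq content 8 60 57 rfl]; rfl
  by_cases h3 : lt = "three_column"
  · subst h3
    simp only [optimize_content_for_layout, h1, h2, if_false, if_true]
    rw [pvBranch_eq content 9 40 37 rfl]; rfl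
  by_cases h4 : lt = "timeline"
  · subst h4
    simp only [optimize_content_for_layout, h1, h2, h3, if_false, if_true]
    rw [pvBranch_eq content 4 30 27 rfl]; rfl
  by_cases h5 : lt = "process_flow"
  · subst h5
    simp only [optimize_content_for_layout, h1, h2, h3, h4, if_false, if_true]
    rw [pvBranch_eq content 5 40 37 rfl]; rfl
  by_cases h6 : lt = "pyramid"
  · subst h6
    simp only [optimize_content_for_layout, h1, h2, h3, h4, h5, if_false, if_true]
    rw [pvBranch_eq content 7 25 22 rfl]; rfl
  by_cases h7 : lt = "dashboard_grid"
  · subst h7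
    simp only [optimize_content_for_layout, h1, h2, h3, h4, h5, h6, if_false, if_true]
    rw [pvBranch_eq content 6 20 17 rfl]; rfl
  by_cases h8 : lt = "quote_highlight"
  · subst h8
    simp only [optimize_content_for_layout, h1, h2, h3, h4, h5, h6, h7, if_false, if_true]
    unfold optimize_content_for_layout_alt
    rw [show pvParams.getD "quote_highlight" (7, none) = (1, some 200) from by decide]
    cases content with
    | nil => rfl
    | cons c0 t =>
      show (if 200 < c0.toList.length then [String.ofList (c0.toList.take 197 ++ ['.', '.', '.'])]
            else (c0 :: t).take 1)
          = pvShrink (c0 :: t) 1 (some 200)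
      by_cases hlen : 200 < c0.toList.length
      · rw [if_pos hlen]
        simp only [pvShrink, if_pos hlen]
        rfl
      · rw [if_neg hlen]
        simp only [pvShrink, if_neg hlen]
        rfl
  by_cases h9 : lt = "split_screen"
  · subst h9
    simp only [optimize_content_for_layout, h1, h2, h3, h4, h5, h6, h7, h8, if_false, if_true]
    rw [pvBranch_eq content 10 300 297 rfl]; rfl
  by_cases h10 : lt = "agenda_toc"
  · subst h10
    simp only [optimize_content_for_layout, h1, h2, h3, h4, h5, h6, h7, h8, h9, if_false, if_true]
    rw [pvBranch_eq content 5 60 57 rfl]; rfl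
  · simp only [optimize_content_for_layout, h1, h2, h3, h4, h5, h6, h7, h8, h9, h10, if_false]
    unfold optimize_content_for_layout_alt
    rw [pvParams_default lt h1 h2 h3 h4 h5 h6 h7 h8 h9 h10]
    exact (pvShrink_none content 7).symm
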